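-- pv_equiv track=rewrite | github.com/nadav5199/practical-applications | Q4/decypher.py | find_matching_segments
-- ===== SOURCE A (Python) =====
-- def find_matching_segments(xor_data, min_length=4):
--     """Find all continuous zero-byte sequences of at least min_length."""
--     matches = []
--     current_start = None
--
--     for i, byte in enumerate(xor_data):
--         if byte == 0:
--             if current_start is None:
--                 current_start = i
--         else:
--             if current_start is not None:
--                 length = i - current_start
--                 if length >= min_length:
--                     matches.append((current_start, length))
--                 current_start = None
--
--     if current_start is not None:
--         length = len(xor_data) - current_start
--         if length >= min_length:
--             matches.append((current_start, length))
--
--     return matches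
-- ===== SOURCE B (Python) =====
-- def find_matching_segments(xor_data, min_length=4):
--     """Find all continuous zero-byte sequences of at least min_length.
--
--     Boundary detection: pad with nonzero sentinels, find run starts (nonzero->zero
--     edges) and run ends (zero->nonzero edges) in two passes, then pair them up."""
--     padded = [1] + list(xor_data) + [1]
--     starts = [i for i, (prev, cur) in enumerate(zip(padded, padded[1:])) if prev != 0 and cur == 0]
--     ends = [i + 1 for i, (cur, nxt) in enumerate(zip(padded[1:], padded[2:])) if cur == 0 and nxt != 0]
--     return [(s, e - s) for s, e in zip(starts, ends) if e - s >= min_length]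
-- ===== Notes on version B (the rewrite author's own statement) =====
-- stated objective: alternative
-- what changed: Replaces A's single stateful scan (current_start sentinel plus trailing flush) by boundary detection: pad with nonzero sentinels, compute run-start edges and run-end edges in two separate comprehensions over adjacent pairs, then zip starts with ends and filter by length.
import Mathlib
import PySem

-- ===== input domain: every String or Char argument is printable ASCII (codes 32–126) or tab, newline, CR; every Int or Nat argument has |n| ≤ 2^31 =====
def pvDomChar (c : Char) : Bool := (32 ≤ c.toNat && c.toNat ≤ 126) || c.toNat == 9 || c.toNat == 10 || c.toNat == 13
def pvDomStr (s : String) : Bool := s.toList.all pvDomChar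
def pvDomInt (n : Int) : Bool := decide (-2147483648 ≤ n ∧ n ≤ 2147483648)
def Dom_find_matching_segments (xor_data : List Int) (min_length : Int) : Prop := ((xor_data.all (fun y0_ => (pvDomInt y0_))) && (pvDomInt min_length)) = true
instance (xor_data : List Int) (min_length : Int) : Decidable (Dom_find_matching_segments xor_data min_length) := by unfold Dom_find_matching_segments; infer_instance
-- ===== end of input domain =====

-- B replaces A's stateful scan (current_start sentinel + trailing flush) by boundary
-- detection: run-start and run-end edges found in two separate passes over adjacent
-- pairs (with nonzero sentinel padding), then zipped and filtered (alternative; same cost).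

-- ===== PORT A =====
-- A's loop over enumerate(xor_data) with state (i, current_start); the post-loop flush of a
-- pending zero-run is the base case (the loop has consumed the whole list there).
def find_matching_segments_go (xs : List Int) (i : Int) (cs : Option Int) (ml : Int) :
    List (Int × Int) :=
  match xs with
  | [] =>
    -- after the loop: if current_start is not None, flush length = len(xor_data) - current_start
    match cs with
    | some s => if i - s ≥ ml then [(s, i - s)] else []
    | none => []
  | b :: rest =>
    if b = 0 then
      find_matching_segments_go rest (i + 1) (match cs with | none => some i | some s => some s) ml
    else
      match cs with
      | some s =>
        (if i - s ≥ ml then [(s, i - s)] else []) ++ find_matching_segments_go rest (i + 1) none ml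
      | none => find_matching_segments_go rest (i + 1) none ml

def find_matching_segments (xor_data : List Int) (min_length : Int) : List (Int × Int) :=
  find_matching_segments_go xor_data 0 none min_length

-- ===== PORT B =====
-- B's first comprehension: enumerate(zip(padded, padded[1:])) carries the previous
-- element (initially the sentinel 1); emits i at every nonzero->zero edge.
def altStarts (prev : Int) (xs : List Int) (i : Int) : List Int :=
  match xs with
  | [] => []
  | c :: r => (if prev ≠ 0 ∧ c = 0 then [i] else []) ++ altStarts c r (i + 1)

-- B's second comprehension: pairs each element with its successor (the sentinel 1
-- after the last element); emits i+1 at every zero->nonzero edge.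
def altEnds (xs : List Int) (i : Int) : List Int :=
  match xs with
  | [] => []
  | [c] => if c = 0 then [i + 1] else []
  | c :: nx :: r => (if c = 0 ∧ nx ≠ 0 then [i + 1] else []) ++ altEnds (nx :: r) (i + 1)

-- B's final comprehension over zip(starts, ends) with the length filter.
def altSelect (S E : List Int) (ml : Int) : List (Int × Int) :=
  match S, E with
  | s :: S', e :: E' => (if e - s ≥ ml then [(s, e - s)] else []) ++ altSelect S' E' ml
  | _, _ => []

def find_matching_segments_alt (xor_data : List Int) (min_length : Int) : List (Int × Int) :=
  altSelect (altStarts 1 xor_data 0) (altEnds xor_data 0) min_length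

-- ===== PRECONDITION & SPEC =====
def Spec_find_matching_segments (xor_data : List Int) (min_length : Int) (out : List (Int × Int)) : Prop := out = find_matching_segments_alt xor_data min_length
instance (xor_data : List Int) (min_length : Int) (out : List (Int × Int)) : Decidable (Spec_find_matching_segments xor_data min_length out) := by unfold Spec_find_matching_segments; infer_instance

-- ===== CLAIM (what is proved, stated in full; the proofs are below) =====
def Claim_equal_find_matching_segments : Prop := ∀ (xor_data : List Int) (min_length : Int), Dom_find_matching_segments xor_data min_length → Spec_find_matching_segments xor_data min_length (find_matching_segments xor_data min_length)

-- ===== LEMMAS AND PROOFS =====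

-- A's loop walks through a block of zero bytes keeping current_start = some s, advancing i.
lemma go_skip_zero (t ys : List Int) (i s ml : Int) (h : ∀ x ∈ t, x = 0) :
    find_matching_segments_go (t ++ ys) i (some s) ml =
      find_matching_segments_go ys (i + t.length) (some s) ml := by
  induction t generalizing i with
  | nil => simp
  | cons b t ih =>
    have hb : b = 0 := h b (List.mem_cons_self ..)
    simp only [List.cons_append, find_matching_segments_go, if_pos hb]
    rw [ih (i + 1) (fun x hx => h x (List.mem_cons_of_mem _ hx))]
    congr 1
    simp only [List.length_cons]
    push_cast
    ring

-- Definitional reduction lemmas for B's helpers.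
lemma altSelect_cons (s e : Int) (S E : List Int) (ml : Int) :
    altSelect (s :: S) (e :: E) ml =
      (if e - s ≥ ml then [(s, e - s)] else []) ++ altSelect S E ml := rfl

lemma altSelect_nil (E : List Int) (ml : Int) : altSelect [] E ml = [] := by
  cases E <;> rfl

lemma altEnds_singleton (c j : Int) : altEnds [c] j = if c = 0 then [j + 1] else [] := rfl

lemma altEnds_cons2 (c nx : Int) (r : List Int) (j : Int) :
    altEnds (c :: nx :: r) j =
      (if c = 0 ∧ nx ≠ 0 then [j + 1] else []) ++ altEnds (nx :: r) (j + 1) := rfl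

-- With prev = 0, a block of zeros contributes no starts (no nonzero->zero edge inside).
lemma starts_zeros (t d : List Int) (j : Int) (h : ∀ x ∈ t, x = 0) :
    altStarts 0 (t ++ d) j = altStarts 0 d (j + t.length) := by
  induction t generalizing j with
  | nil => simp
  | cons b t ih =>
    have hb : b = 0 := h b (List.mem_cons_self ..)
    subst hb
    simp only [List.cons_append, altStarts]
    rw [ih (j + 1) (fun x hx => h x (List.mem_cons_of_mem _ hx))]
    simp only [List.length_cons]
    norm_num
    congr 1
    ring

-- A nonempty all-zero block contributes no ends until its last zero, which is kept.
lemma ends_zeros (t d : List Int) (j : Int) (h : ∀ x ∈ t, x = 0) (hne : t ≠ []) :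
    altEnds (t ++ d) j = altEnds (0 :: d) (j + t.length - 1) := by
  induction t generalizing j with
  | nil => exact absurd rfl hne
  | cons b t ih =>
    have hb : b = 0 := h b (List.mem_cons_self ..)
    subst hb
    match t with
    | [] => simp
    | y :: t' =>
      have hy : y = 0 := h y (by simp)
      subst hy
      simp only [List.cons_append, altEnds]
      norm_num
      rw [show (0:Int) :: (t' ++ d) = (0 :: t') ++ d from (List.cons_append ..).symm]
      rw [ih (j + 1) (fun x hx => h x (List.mem_cons_of_mem _ hx)) (by simp)]
      congr 1
      simp only [List.length_cons]
      push_cast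
      ring

-- A nonzero byte is never a run end.
lemma ends_nonzero_step (b : Int) (rest : List Int) (j : Int) (hb : b ≠ 0) :
    altEnds (b :: rest) j = altEnds rest (j + 1) := by
  match rest with
  | [] => simp [altEnds, hb]
  | c :: r => simp [altEnds, hb]

-- Main lemma: with a nonzero previous byte, B's zipped boundary lists reproduce A's scan.
lemma select_eq_go (xs : List Int) (prev i ml : Int) (hprev : prev ≠ 0) :
    altSelect (altStarts prev xs i) (altEnds xs i) ml =
      find_matching_segments_go xs i none ml := by
  induction hn : xs.length using Nat.strong_induction_on generalizing xs prev i with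
  | _ n ih
  match xs with
  | [] => simp [altStarts, altEnds, altSelect, find_matching_segments_go]
  | b :: rest =>
    have hlen : (rest.dropWhile (· = (0:Int))).length ≤ rest.length :=
      List.length_dropWhile_le _ rest
    by_cases hb : b = 0
    · subst hb
      set t := rest.takeWhile (· = (0:Int)) with ht
      set d := rest.dropWhile (· = (0:Int)) with hd
      have htz : ∀ x ∈ t, x = 0 := by
        intro y hy
        rw [ht] at hy
        exact of_decide_eq_true (List.mem_takeWhile_imp (p := fun x => decide (x = (0:Int))) hy)
      have hrest : rest = t ++ d := (List.takeWhile_append_dropWhile ..).symm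
      -- starts
      have hS : altStarts prev (0 :: rest) i
          = i :: altStarts 0 d (i + 1 + t.length) := by
        simp only [altStarts]
        rw [hrest, starts_zeros _ _ _ htz]
        simp [hprev]
      -- ends
      have hE : altEnds (0 :: rest) i = altEnds (0 :: d) (i + t.length) := by
        rw [hrest]
        rw [show (0:Int) :: (t ++ d) = (0 :: t) ++ d from rfl]
        rw [ends_zeros (0 :: t) d i
          (by
            intro x hx
            rcases List.mem_cons.mp hx with h | h
            · exact h
            · exact htz _ h)
          (by simp)]
        congr 1
        simp only [List.length_cons]
        push_cast
        ring
      -- A side: walk the zero block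
      have hA : find_matching_segments_go (0 :: rest) i none ml
          = find_matching_segments_go d (i + 1 + t.length) (some i) ml := by
        simp only [find_matching_segments_go]
        rw [hrest, go_skip_zero _ _ _ _ _ htz]
        simp
      rw [hS, hE, hA]
      match hdd : d with
      | [] =>
        have e1 : altEnds [(0:Int)] (i + (t.length : Int)) = [i + t.length + 1] := by
          rw [altEnds_singleton]
          norm_num
        have e2 : altStarts 0 ([] : List Int) (i + 1 + t.length) = [] := rfl
        rw [e1, e2, altSelect_cons, altSelect_nil]
        simp only [find_matching_segments_go, List.append_nil]
        split_ifs with h1 h2 <;> first | rfl | omega | (simp; omega)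
      | c :: r' =>
        have hc : c ≠ 0 := by
          have := List.head?_dropWhile_not (fun x => decide (x = (0:Int))) rest
          rw [← hd] at this
          simpa using this
        have hE2 : altEnds ((0:Int) :: c :: r') (i + t.length)
            = (i + t.length + 1) :: altEnds r' (i + t.length + 2) := by
          rw [altEnds_cons2, ends_nonzero_step c r' _ hc]
          simp [hc]
          congr 1
          ring
        have hS2 : altStarts 0 (c :: r') (i + 1 + t.length)
            = altStarts c r' (i + t.length + 2) := by
          simp only [altStarts]
          simp [hc]
          congr 1
          ring
        rw [hE2, hS2]
        have hIH : altSelect (altStarts c r' (i + t.length + 2)) (altEnds r' (i + t.length + 2)) ml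
            = find_matching_segments_go r' (i + t.length + 2) none ml := by
          refine ih r'.length ?_ r' c _ hc rfl
          have hle : (c :: r').length ≤ rest.length := hlen
          simp only [List.length_cons] at hle
          have hnn : (0 :: rest).length = n := hn
          simp only [List.length_cons] at hnn
          omega
        rw [altSelect_cons]
        simp only [find_matching_segments_go, if_neg hc, hIH]
        have harith : find_matching_segments_go r' (i + 1 + ↑t.length + 1) none ml
            = find_matching_segments_go r' (i + ↑t.length + 2) none ml := by
          congr 1
          ring
        rw [harith]
        congr 1
        split_ifs with h1 h2 <;> first | rfl | omega | (simp; omega)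
    · -- nonzero head: no edge on either side, step one element
      have hS : altStarts prev (b :: rest) i = altStarts b rest (i + 1) := by
        simp [altStarts, hb]
      have hE := ends_nonzero_step b rest i hb
      rw [hS, hE, ih rest.length (by simp only [List.length_cons] at hn; omega) rest b (i + 1) hb rfl]
      simp [find_matching_segments_go, hb]

-- ===== VERDICT (by name: the statement is the Claim_ definition above) =====
theorem find_matching_segments_spec : Claim_equal_find_matching_segments := by
  intro xs ml _
  unfold Spec_find_matching_segments find_matching_segments find_matching_segments_alt
  exact (select_eq_go xs 1 0 ml one_ne_zero).symm
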